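-- pv_equiv track=rewrite | github.com/Ella5694/ai_tutor_assistant | app.py | _split_safe_math_prefix
-- ===== SOURCE A (Python) =====
-- from typing import Any, Dict, Generator, List, Optional, Tuple
--
-- def _split_safe_math_prefix(text: str) -> Tuple[str, str]:
--     in_inline = False
--     in_block = False
--     i = 0
--     last_safe = 0
--
--     while i < len(text):
--         if text.startswith("$$", i):
--             in_block = not in_block
--             i += 2
--         elif text[i] == "$":
--             if not in_block:
--                 in_inline = not in_inline
--             i += 1
--         else:
--             i += 1
--
--         if not in_inline and not in_block:
--             last_safe = i
--
--     return text[:last_safe], text[last_safe:]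
-- ===== SOURCE B (Python) =====
-- def _split_safe_math_prefix(text):
--     # Skip-scan: jump between "$" delimiters with str.find and search for the
--     # matching closer of each math region; no per-character flag toggling.
--     def _inline_close(i):
--         # index just after the single "$" closing an inline region opened
--         # earlier, skipping embedded "$$...$$" display runs; -1 if unclosed
--         while True:
--             m = text.find("$", i)
--             if m == -1:
--                 return -1
--             if text.startswith("$$", m):
--                 k = text.find("$$", m + 2)
--                 if k == -1:
--                     return -1
--                 i = k + 2
--             else:
--                 return m + 1
--
--     i = 0
--     while True:
--         j = text.find("$", i)
--         if j == -1:
--             return text, ""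
--         if text.startswith("$$", j):
--             k = text.find("$$", j + 2)
--             if k == -1:
--                 return text[:j], text[j:]
--             i = k + 2
--         else:
--             c = _inline_close(j + 1)
--             if c == -1:
--                 return text[:j], text[j:]
--             i = c
-- ===== Notes on version B (the rewrite author's own statement) =====
-- stated objective: alternative
-- what changed: B replaces A's per-character two-flag state machine by a skip-scan: it jumps with str.find to the next '$' delimiter, classifies it, and searches directly for the matching closer of each inline or display math region ('$$' for a block, a single '$' skipping embedded '$$...$$' runs for inline), returning at the opener of the first unclosed region.
import Mathlib
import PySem

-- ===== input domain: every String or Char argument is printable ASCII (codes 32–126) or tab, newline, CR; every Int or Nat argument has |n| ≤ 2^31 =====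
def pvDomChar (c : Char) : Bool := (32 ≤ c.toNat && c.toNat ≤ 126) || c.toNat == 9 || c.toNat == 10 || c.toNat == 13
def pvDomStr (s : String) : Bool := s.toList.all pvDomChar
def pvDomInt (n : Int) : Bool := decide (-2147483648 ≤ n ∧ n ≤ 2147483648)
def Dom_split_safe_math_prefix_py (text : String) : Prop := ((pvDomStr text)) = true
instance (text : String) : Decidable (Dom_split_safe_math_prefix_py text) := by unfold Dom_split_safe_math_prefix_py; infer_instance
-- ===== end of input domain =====

-- B replaces A's per-character flag-toggling scan by a skip-scan that jumps with
-- str.find to each "$" delimiter and searches for the matching closer of each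
-- math region (objective: alternative decomposition, no per-character state).

-- ===== PORT A =====
-- A's while-loop, carried over the unscanned suffix text[i:] together with i,
-- the two flags and last_safe; last_safe is refreshed after every consumed step.
def pvLoopA : List Char → Bool → Bool → Nat → Nat → Nat
  | [], _, _, _, last_safe => last_safe
  | '$' :: '$' :: rest, in_inline, in_block, i, last_safe =>
      pvLoopA rest in_inline (!in_block) (i + 2)
        (if !in_inline && !(!in_block) then i + 2 else last_safe)
  | c :: rest, in_inline, in_block, i, last_safe =>
      if c = '$' then
        if !in_block then
          pvLoopA rest (!in_inline) in_block (i + 1)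
            (if !(!in_inline) && !in_block then i + 1 else last_safe)
        else
          pvLoopA rest in_inline in_block (i + 1)
            (if !in_inline && !in_block then i + 1 else last_safe)
      else
        pvLoopA rest in_inline in_block (i + 1)
          (if !in_inline && !in_block then i + 1 else last_safe)

def split_safe_math_prefix_py (text : String) : String × String :=
  (String.ofList (text.toList.take (pvLoopA text.toList false false 0 0)),
   String.ofList (text.toList.drop (pvLoopA text.toList false false 0 0)))

-- ===== PORT B =====
-- text.find("$", i), as the offset of the first '$' in the suffix text[i:] (exact hand port of str.find; none = -1).
def pvFindD : List Char → Option Nat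
  | [] => none
  | c :: rest => if c = '$' then some 0 else (pvFindD rest).map (· + 1)

-- text.startswith("$$", m), applied to the suffix text[m:] (exact).
def pvStartsDD : List Char → Bool
  | '$' :: '$' :: _ => true
  | _ => false

-- text.find("$$", i), as the offset of the first occurrence of "$$" in text[i:] (exact; none = -1).
def pvFindDD : List Char → Option Nat
  | '$' :: '$' :: _ => some 0
  | [] => none
  | _ :: rest => (pvFindDD rest).map (· + 1)

-- _inline_close(i): index just after the single "$" closing an inline region,
-- skipping embedded "$$...$$" display runs; none mirrors Python's -1 (unclosed).
-- fuel only bounds the iteration count so the loop is total; text.length + 1 is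
-- always enough, since i grows by at least one position per iteration.
def pvInlineClose (text : List Char) (fuel i : Nat) : Option Nat :=
  match fuel with
  | 0 => none
  | fuel + 1 =>
      match pvFindD (text.drop i) with
      | none => none
      | some d =>
          if pvStartsDD (text.drop (i + d)) then
            match pvFindDD (text.drop (i + d + 2)) with
            | none => none
            | some e => pvInlineClose text fuel (i + d + 2 + e + 2)
          else
            some (i + d + 1)

-- B's outer loop: the split position, starting from the safe position i.
def pvNeutralScan (text : List Char) (fuel i : Nat) : Nat :=
  match fuel with
  | 0 => 0
  | fuel + 1 =>
      match pvFindD (text.drop i) with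
      | none => text.length
      | some d =>
          if pvStartsDD (text.drop (i + d)) then
            match pvFindDD (text.drop (i + d + 2)) with
            | none => i + d
            | some e => pvNeutralScan text fuel (i + d + 2 + e + 2)
          else
            match pvInlineClose text fuel (i + d + 1) with
            | none => i + d
            | some c => pvNeutralScan text fuel c

def split_safe_math_prefix_py_alt (text : String) : String × String :=
  (String.ofList (text.toList.take (pvNeutralScan text.toList (text.toList.length + 1) 0)),
   String.ofList (text.toList.drop (pvNeutralScan text.toList (text.toList.length + 1) 0)))

-- ===== PRECONDITION & SPEC =====
def Spec_split_safe_math_prefix_py (text : String) (out : String × String) : Prop := out = split_safe_math_prefix_py_alt text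
instance (text : String) (out : String × String) : Decidable (Spec_split_safe_math_prefix_py text out) := by unfold Spec_split_safe_math_prefix_py; infer_instance

-- ===== CLAIM (what is proved, stated in full; the proofs are below) =====
def Claim_equal_split_safe_math_prefix_py : Prop := ∀ (text : String), Dom_split_safe_math_prefix_py text → Spec_split_safe_math_prefix_py text (split_safe_math_prefix_py text)

-- ===== LEMMAS AND PROOFS =====

-- range facts about the two find helpers, used to show fuel never runs out
theorem pvFindD_lt_length (cs : List Char) (d : Nat) (h : pvFindD cs = some d) :
    d < cs.length := by
  induction cs generalizing d with
  | nil => simp [pvFindD] at h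
  | cons c rest ih =>
      by_cases hc : c = '$'
      · simp [pvFindD, hc] at h; simp; omega
      · simp [pvFindD, hc] at h
        obtain ⟨d', hd', rfl⟩ := h
        have := ih d' hd'
        simp; omega

theorem pvFindDD_lt_length (cs : List Char) (e : Nat) (h : pvFindDD cs = some e) :
    e + 1 < cs.length := by
  induction cs using pvFindDD.induct generalizing e with
  | case1 r => simp [pvFindDD] at h; subst h; simp
  | case2 => simp [pvFindDD] at h
  | case3 c rest hne ih =>
      rw [pvFindDD.eq_def] at h
      split at h
      · rename_i r heq
        injection heq with h1 h2
        exact absurd h2 (by intro hh; exact hne r h1 hh)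
      · simp at h
      · rename_i c' rest' heq
        injection heq with h1 h2
        subst h1; subst h2
        simp at h
        obtain ⟨e', he', rfl⟩ := h
        have := ih e' he'
        simp; omega


-- unfolding pvLoopA on a '$' not followed by a second '$', out of a block
theorem pvLoopA_open (rest : List Char) (h : ∀ r, rest ≠ '$' :: r) (inl : Bool) (i ls : Nat) :
    pvLoopA ('$' :: rest) inl false i ls
      = pvLoopA rest (!inl) false (i + 1) (if !(!inl) then i + 1 else ls) := by
  cases rest with
  | nil => simp [pvLoopA]
  | cons d r =>
      have hd : d ≠ '$' := fun hd => h r (by rw [hd])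
      rw [pvLoopA.eq_def]
      simp [hd]

-- unfolding pvLoopA on a '$' not followed by a second '$', inside a block
theorem pvLoopA_inblk (rest : List Char) (h : ∀ r, rest ≠ '$' :: r) (inl : Bool) (i ls : Nat) :
    pvLoopA ('$' :: rest) inl true i ls = pvLoopA rest inl true (i + 1) ls := by
  cases rest with
  | nil => simp [pvLoopA]
  | cons d r =>
      have hd : d ≠ '$' := fun hd => h r (by rw [hd])
      rw [pvLoopA.eq_def]
      simp [hd]

-- unfolding pvLoopA on a non-'$' character
theorem pvLoopA_skip (c : Char) (rest : List Char) (hc : c ≠ '$') (inl blk : Bool) (i ls : Nat) :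
    pvLoopA (c :: rest) inl blk i ls
      = pvLoopA rest inl blk (i + 1) (if !inl && !blk then i + 1 else ls) := by
  rw [pvLoopA.eq_def]
  simp [hc]

-- unfolding pvLoopA on "$$"
theorem pvLoopA_dd (rest : List Char) (inl blk : Bool) (i ls : Nat) :
    pvLoopA ('$' :: '$' :: rest) inl blk i ls
      = pvLoopA rest inl (!blk) (i + 2) (if !inl && !(!blk) then i + 2 else ls) := by
  simp [pvLoopA]

-- pvStartsDD characterizations
theorem pvStartsDD_true (cs : List Char) (h : pvStartsDD cs = true) :
    ∃ r, cs = '$' :: '$' :: r := by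
  rw [pvStartsDD.eq_def] at h
  split at h
  · exact ⟨_, rfl⟩
  · cases h

theorem pvStartsDD_false (rest : List Char) (h : pvStartsDD ('$' :: rest) = false) :
    ∀ r, rest ≠ '$' :: r := by
  intro r hr
  subst hr
  simp [pvStartsDD] at h

-- pvFindD characterization: before the first '$' the text is '$'-free, and a '$' sits there
theorem pvFindD_spec (cs : List Char) (d : Nat) (h : pvFindD cs = some d) :
    pvFindD (cs.take d) = none ∧ cs.drop d = '$' :: cs.drop (d + 1) := by
  induction cs generalizing d with
  | nil => simp [pvFindD] at h
  | cons c rest ih =>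
      by_cases hc : c = '$'
      · simp [pvFindD, hc] at h
        subst h
        simp [pvFindD, hc]
      · simp [pvFindD, hc] at h
        obtain ⟨d', hd', rfl⟩ := h
        obtain ⟨h1, h2⟩ := ih d' hd'
        refine ⟨?_, ?_⟩
        · simp [pvFindD, hc, h1]
        · simpa using h2

-- A's loop walks through a '$'-free prefix: only i and last_safe advance
theorem pvLoopA_dollarfree (pre : List Char) (hp : pvFindD pre = none) :
    ∀ (rest : List Char) (inl blk : Bool) (i ls : Nat),
      ((!inl && !blk) = true → ls = i) →
      pvLoopA (pre ++ rest) inl blk i ls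
        = pvLoopA rest inl blk (i + pre.length)
            (if (!inl && !blk) = true then i + pre.length else ls) := by
  induction pre with
  | nil =>
      intro rest inl blk i ls hls
      simp only [List.nil_append, List.length_nil, Nat.add_zero]
      by_cases hn : (!inl && !blk) = true
      · rw [if_pos hn, ← hls hn]
      · rw [if_neg hn]
  | cons c pre' ih =>
      intro rest inl blk i ls hls
      have hc : c ≠ '$' := by
        intro hcc
        simp [pvFindD, hcc] at hp
      have hp' : pvFindD pre' = none := by
        simp [pvFindD, hc] at hp
        exact hp
      rw [List.cons_append, pvLoopA_skip c _ hc]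
      rw [ih hp' rest inl blk (i + 1) _ (fun hn => by rw [if_pos hn])]
      have hlen : i + 1 + pre'.length = i + (c :: pre').length := by simp; omega
      rw [hlen]
      by_cases hn : (!inl && !blk) = true
      · simp [hn]
      · simp [hn]

-- inside a block with no "$$" left, A's loop never updates last_safe
theorem pvLoopA_block_none (cs : List Char) (h : pvFindDD cs = none) :
    ∀ (inl : Bool) (i ls : Nat), pvLoopA cs inl true i ls = ls := by
  induction cs using pvFindDD.induct with
  | case1 r => simp [pvFindDD] at h
  | case2 => intro inl i ls; simp [pvLoopA]
  | case3 c rest hne ih =>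
      intro inl i ls
      have h' : pvFindDD rest = none := by
        rw [pvFindDD.eq_def] at h
        split at h
        · rename_i r heq
          injection heq with h1 h2
          exact absurd h2 (by intro hh; exact hne r h1 hh)
        · rename_i heq
          exact absurd heq (by simp)
        · rename_i c' rest' heq
          injection heq with h1 h2
          subst h1; subst h2
          simpa using h
      by_cases hc : c = '$'
      · subst hc
        rw [pvLoopA_inblk rest (fun r hr => hne r rfl hr)]
        exact ih h' inl (i + 1) ls
      · rw [pvLoopA_skip c rest hc]
        simpa using ih h' inl (i + 1) ls

-- inside a block, A's loop runs to the leftmost "$$" and closes the block there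
theorem pvLoopA_block_close (cs : List Char) (e : Nat) (h : pvFindDD cs = some e) :
    ∀ (inl : Bool) (i ls : Nat),
      pvLoopA cs inl true i ls
        = pvLoopA (cs.drop (e + 2)) inl false (i + e + 2)
            (if !inl then i + e + 2 else ls) := by
  induction cs using pvFindDD.induct generalizing e with
  | case1 r =>
      intro inl i ls
      simp [pvFindDD] at h
      subst h
      rw [pvLoopA_dd]
      simp
  | case2 => simp [pvFindDD] at h
  | case3 c rest hne ih =>
      intro inl i ls
      rw [pvFindDD.eq_def] at h
      have h' : ∃ e', pvFindDD rest = some e' ∧ e = e' + 1 := by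
        split at h
        · rename_i r heq
          injection heq with h1 h2
          exact absurd h2 (by intro hh; exact hne r h1 hh)
        · simp at h
        · rename_i c' rest' heq
          injection heq with h1 h2
          subst h1; subst h2
          simp at h
          obtain ⟨e', he', rfl⟩ := h
          exact ⟨e', he', rfl⟩
      obtain ⟨e', he', rfl⟩ := h'
      have hstep : pvLoopA (c :: rest) inl true i ls = pvLoopA rest inl true (i + 1) ls := by
        by_cases hc : c = '$'
        · subst hc
          exact pvLoopA_inblk rest (fun r hr => hne r rfl hr) inl i ls
        · rw [pvLoopA_skip c rest hc]
          simp
      rw [hstep, ih e' he' inl (i + 1) ls]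
      have hidx : i + 1 + e' + 2 = i + (e' + 1) + 2 := by omega
      rw [hidx]
      rfl

-- a returned close position lies strictly beyond i and inside the text
theorem pvInlineClose_bounds (text : List Char) (fuel : Nat) :
    ∀ i c, pvInlineClose text fuel i = some c → i < c ∧ c ≤ text.length := by
  induction fuel with
  | zero => intro i c h; simp [pvInlineClose] at h
  | succ fuel ih =>
      intro i c h
      rw [pvInlineClose] at h
      cases hf : pvFindD (text.drop i) with
      | none => rw [hf] at h; cases h
      | some d =>
          rw [hf] at h
          dsimp only at h
          have hd : d < (text.drop i).length := pvFindD_lt_length _ _ hf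
          simp only [List.length_drop] at hd
          by_cases hs : pvStartsDD (text.drop (i + d)) = true
          · rw [if_pos hs] at h
            cases h2 : pvFindDD (text.drop (i + d + 2)) with
            | none => rw [h2] at h; cases h
            | some e =>
                rw [h2] at h
                have := ih _ _ h
                omega
          · rw [if_neg hs] at h
            injection h with h'
            omega

-- A's loop in the inline state equals B's _inline_close followed by a neutral restart
theorem pvLoopA_eq_inlineClose (text : List Char) (fuel : Nat) :
    ∀ i2, text.length - i2 < fuel →
    ∀ ls, pvLoopA (text.drop i2) true false i2 ls
      = match pvInlineClose text fuel i2 with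
        | none => ls
        | some c => pvLoopA (text.drop c) false false c c := by
  induction fuel with
  | zero => intro i2 hfuel; omega
  | succ fuel ih =>
      intro i2 hfuel ls
      rw [pvInlineClose]
      cases hf : pvFindD (text.drop i2) with
      | none =>
          have := pvLoopA_dollarfree (text.drop i2) hf [] true false i2 ls (by simp)
          simpa using this
      | some d =>
          obtain ⟨hpre, hdrop⟩ := pvFindD_spec _ _ hf
          have hd : d < (text.drop i2).length := pvFindD_lt_length _ _ hf
          have hdl : d < text.length - i2 := by simpa using hd
          conv_lhs => rw [← List.take_append_drop d (text.drop i2)]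
          rw [pvLoopA_dollarfree _ hpre _ true false i2 ls (by simp)]
          rw [List.drop_drop, List.length_take, Nat.min_eq_left (Nat.le_of_lt hd)]
          rw [if_neg (by decide)]
          dsimp only
          by_cases hs : pvStartsDD (text.drop (i2 + d)) = true
          · rw [if_pos hs]
            obtain ⟨r2, hr2⟩ := pvStartsDD_true _ hs
            rw [hr2, pvLoopA_dd, if_neg (by decide)]
            simp only [Bool.not_false]
            have hr2len : r2 = text.drop (i2 + d + 2) := by
              have h1 : List.drop 2 (List.drop (i2 + d) text) = List.drop 2 ('$' :: '$' :: r2) := by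
                rw [hr2]
              simp [List.drop_drop] at h1
              exact h1.symm
            rw [hr2len]
            cases h2 : pvFindDD (text.drop (i2 + d + 2)) with
            | none => exact pvLoopA_block_none _ h2 true (i2 + d + 2) ls
            | some e =>
                rw [pvLoopA_block_close _ e h2 true (i2 + d + 2) ls]
                rw [if_neg (by decide), List.drop_drop]
                have he' : e + 1 < (List.drop (i2 + d + 2) text).length := pvFindDD_lt_length _ _ h2
                simp only [List.length_drop] at he'
                have hidx : i2 + d + 2 + (e + 2) = i2 + d + 2 + e + 2 := by omega
                rw [hidx]
                exact ih (i2 + d + 2 + e + 2) (by omega) ls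
          · rw [if_neg hs]
            have hs' : pvStartsDD (text.drop (i2 + d)) = false := by simpa using hs
            simp only [List.drop_drop] at hdrop
            rw [hdrop]
            have hrest : ∀ r, text.drop (i2 + (d + 1)) ≠ '$' :: r := by
              have := pvStartsDD_false (text.drop (i2 + (d + 1)))
              rw [← hdrop] at this
              exact this hs'
            rw [pvLoopA_open _ hrest true (i2 + d) ls]
            simp only [Bool.not_true, Bool.not_false]
            have hidx : i2 + (d + 1) = i2 + d + 1 := by omega
            rw [hidx]
            simp

-- main bridge: A's loop from a neutral state equals B's skip-scan
theorem pvLoopA_eq_neutralScan (text : List Char) (fuel : Nat) :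
    ∀ i, i ≤ text.length → text.length - i < fuel →
    pvLoopA (text.drop i) false false i i = pvNeutralScan text fuel i := by
  induction fuel with
  | zero => intro i hi hfuel; omega
  | succ fuel ih =>
      intro i hi hfuel
      rw [pvNeutralScan]
      cases hf : pvFindD (text.drop i) with
      | none =>
          conv_lhs => rw [← List.append_nil (text.drop i)]
          rw [pvLoopA_dollarfree _ hf [] false false i i (fun _ => rfl)]
          simp [pvLoopA]
          omega
      | some d =>
          obtain ⟨hpre, hdrop⟩ := pvFindD_spec _ _ hf
          have hd : d < (text.drop i).length := pvFindD_lt_length _ _ hf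
          have hdl : d < text.length - i := by simpa using hd
          conv_lhs => rw [← List.take_append_drop d (text.drop i)]
          rw [pvLoopA_dollarfree _ hpre _ false false i i (fun _ => rfl)]
          rw [List.drop_drop, List.length_take, Nat.min_eq_left (Nat.le_of_lt hd)]
          rw [if_pos (by decide)]
          dsimp only
          by_cases hs : pvStartsDD (text.drop (i + d)) = true
          · rw [if_pos hs]
            obtain ⟨r2, hr2⟩ := pvStartsDD_true _ hs
            rw [hr2, pvLoopA_dd, if_neg (by decide)]
            simp only [Bool.not_false]
            have hr2len : r2 = text.drop (i + d + 2) := by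
              have h1 : List.drop 2 (List.drop (i + d) text) = List.drop 2 ('$' :: '$' :: r2) := by
                rw [hr2]
              simp [List.drop_drop] at h1
              exact h1.symm
            rw [hr2len]
            cases h2 : pvFindDD (text.drop (i + d + 2)) with
            | none => exact pvLoopA_block_none _ h2 false (i + d + 2) (i + d)
            | some e =>
                rw [pvLoopA_block_close _ e h2 false (i + d + 2) (i + d)]
                rw [if_pos (by decide), List.drop_drop]
                have he' : e + 1 < (List.drop (i + d + 2) text).length := pvFindDD_lt_length _ _ h2
                simp only [List.length_drop] at he'
                have hidx : i + d + 2 + (e + 2) = i + d + 2 + e + 2 := by omega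
                rw [hidx]
                exact ih (i + d + 2 + e + 2) (by omega) (by omega)
          · rw [if_neg hs]
            have hs' : pvStartsDD (text.drop (i + d)) = false := by simpa using hs
            simp only [List.drop_drop] at hdrop
            rw [hdrop]
            have hrest : ∀ r, text.drop (i + (d + 1)) ≠ '$' :: r := by
              have := pvStartsDD_false (text.drop (i + (d + 1)))
              rw [← hdrop] at this
              exact this hs'
            rw [pvLoopA_open _ hrest false (i + d) (i + d)]
            simp only [Bool.not_false, Bool.not_true]
            rw [if_neg (by decide : ¬(false = true))]
            have hidx : i + (d + 1) = i + d + 1 := by omega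
            rw [hidx]
            rw [pvLoopA_eq_inlineClose text fuel (i + d + 1) (by omega) (i + d)]
            cases hc : pvInlineClose text fuel (i + d + 1) with
            | none => rfl
            | some c =>
                have hb := pvInlineClose_bounds text fuel (i + d + 1) c hc
                exact ih c (by omega) (by omega)

-- ===== VERDICT (by name: the statement is the Claim_ definition above) =====
theorem split_safe_math_prefix_py_spec : Claim_equal_split_safe_math_prefix_py := by
  intro text _
  unfold Spec_split_safe_math_prefix_py split_safe_math_prefix_py split_safe_math_prefix_py_alt
  have h := pvLoopA_eq_neutralScan text.toList (text.toList.length + 1) 0 (by simp) (by omega)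
  simp only [List.drop_zero] at h
  rw [h]
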